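-- pv_equiv track=rewrite | github.com/HaihuaQu/Serial_python | access_calculator.py | calculate_access
-- ===== SOURCE A (Python) =====
-- def calculate_access(user_id, role, status, flags):
--     # 处理Banned和Override标记
--     has_banned = 'Banned' in flags
--     has_override = 'Override' in flags
--
--     if has_banned:
--         if has_override:
--             # 继承上一次非Banned状态的权限，这里假设没有历史记录时根据当前角色状态计算
--             # 移除Banned标记后重新计算
--             new_flags = [f for f in flags if f != 'Banned']
--             return calculate_access(user_id, role, status, new_flags)
--         else:
--             return '无访问'
--
--     # Admin角色逻辑
--     if role == 'Admin':
--         if status == 'Suspended' and 'Premium' in flags: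
--             if 'Trial' in flags:
--                 return '完全访问'
--             else:
--                 return '只读'
--         else:
--             return '完全访问'
--
--     # Editor角色逻辑
--     elif role == 'Editor':
--         if status == 'Active':
--             if 'Trial' in flags and 'Premium' in flags:
--                 return '部分编辑'
--             else:
--                 return '完全编辑'
--         else:
--             return '只读'
--
--     # Viewer角色逻辑
--     elif role == 'Viewer':
--         has_premium = 'Premium' in flags
--         has_trial = 'Trial' in flags
--
--         if has_premium and status == 'Inactive':
--             if has_trial:
--                 return '只读'
--             else:
--                 return '隐藏内容访问'
--         else:
--             return '只读'
--
--     # 默认情况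
--     return '只读'
-- ===== SOURCE B (Python) =====
-- def calculate_access(user_id, role, status, flags):
--     # Non-recursive: a banned user without override has no access; otherwise
--     # the Banned flag is irrelevant (only Premium/Trial are ever consulted).
--     if 'Banned' in flags and 'Override' not in flags:
--         return '无访问'
--     premium = 'Premium' in flags
--     trial = 'Trial' in flags
--     if role == 'Admin':
--         if status == 'Suspended' and premium and not trial:
--             return '只读'
--         return '完全访问'
--     if role == 'Editor':
--         if status != 'Active':
--             return '只读'
--         return '部分编辑' if premium and trial else '完全编辑'
--     if role == 'Viewer' and premium and status == 'Inactive' and not trial: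
--         return '隐藏内容访问'
--     return '只读'
-- ===== Notes on version B (the rewrite author's own statement) =====
-- stated objective: simpler
-- what changed: Removes the self-recursion and the flag-list rebuild entirely: one guard for Banned-without-Override, then a single flat role dispatch on boolean Premium/Trial tests (Banned removal is irrelevant since only Premium/Trial are consulted).
import Mathlib
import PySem

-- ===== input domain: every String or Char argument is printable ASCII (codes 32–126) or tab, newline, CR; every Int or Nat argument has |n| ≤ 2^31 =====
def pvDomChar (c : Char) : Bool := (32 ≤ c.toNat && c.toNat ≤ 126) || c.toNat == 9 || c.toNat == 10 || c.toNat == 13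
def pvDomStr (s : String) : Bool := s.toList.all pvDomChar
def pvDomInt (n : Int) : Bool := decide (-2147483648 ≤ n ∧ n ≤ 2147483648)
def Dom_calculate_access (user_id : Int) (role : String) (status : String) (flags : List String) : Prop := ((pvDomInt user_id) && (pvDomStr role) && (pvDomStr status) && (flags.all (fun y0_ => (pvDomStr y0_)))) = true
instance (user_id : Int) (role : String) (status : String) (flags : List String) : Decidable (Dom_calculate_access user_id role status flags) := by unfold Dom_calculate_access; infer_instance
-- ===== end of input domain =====

-- B removes A's self-recursion and flag-list rebuild: one Banned/Override guard, then a single flat role dispatch.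

-- ===== PORT A =====
def calculate_access (user_id : Int) (role : String) (status : String) (flags : List String) : String :=
  let has_banned := flags.contains "Banned"
  let has_override := flags.contains "Override"
  if hb : has_banned = true then
    if has_override = true then
      -- new_flags = [f for f in flags if f != 'Banned']; recursive call
      calculate_access user_id role status (flags.filter (fun f => f != "Banned"))
    else "无访问"
  else
    if role == "Admin" then
      if status == "Suspended" && flags.contains "Premium" then
        if flags.contains "Trial" then "完全访问" else "只读"
      else "完全访问"
    else if role == "Editor" then
      if status == "Active" then
        if flags.contains "Trial" && flags.contains "Premium" then "部分编辑" else "完全编辑"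
      else "只读"
    else if role == "Viewer" then
      let has_premium := flags.contains "Premium"
      let has_trial := flags.contains "Trial"
      if has_premium && status == "Inactive" then
        if has_trial then "只读" else "隐藏内容访问"
      else "只读"
    else "只读"
termination_by flags.length
decreasing_by
  have hm : "Banned" ∈ flags := List.contains_iff_mem.mp hb
  simp only [List.length_unattach]
  calc (List.filter (fun x : {x // x ∈ flags} => ↑x != "Banned") flags.attach).length
      < flags.attach.length :=
        List.length_filter_lt_length_iff_exists.mpr ⟨⟨"Banned", hm⟩, List.mem_attach _ _, by simp⟩
    _ = flags.length := List.length_attach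

-- ===== PORT B =====
def calculate_access_alt (user_id : Int) (role : String) (status : String) (flags : List String) : String :=
  if flags.contains "Banned" && !(flags.contains "Override") then "无访问"
  else
    let premium := flags.contains "Premium"
    let trial := flags.contains "Trial"
    if role == "Admin" then
      if status == "Suspended" && premium && !trial then "只读" else "完全访问"
    else if role == "Editor" then
      if status != "Active" then "只读"
      else if premium && trial then "部分编辑" else "完全编辑"
    else if role == "Viewer" && premium && status == "Inactive" && !trial then "隐藏内容访问"
    else "只读"

-- ===== PRECONDITION & SPEC =====
def Spec_calculate_access (user_id : Int) (role : String) (status : String) (flags : List String) (out : String) : Prop := out = calculate_access_alt user_id role status flags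
instance (user_id : Int) (role : String) (status : String) (flags : List String) (out : String) : Decidable (Spec_calculate_access user_id role status flags out) := by unfold Spec_calculate_access; infer_instance

-- ===== CLAIM (what is proved, stated in full; the proofs are below) =====
def Claim_equal_calculate_access : Prop := ∀ (user_id : Int) (role : String) (status : String) (flags : List String), Dom_calculate_access user_id role status flags → Spec_calculate_access user_id role status flags (calculate_access user_id role status flags)

-- ===== LEMMAS AND PROOFS =====

-- the role/status/flag dispatch of port A, abstracted over its eight boolean tests
def pvDispA (a e v ss sa si p t : Bool) : String :=
  if a then
    if ss && p then (if t then "完全访问" else "只读") else "完全访问"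
  else if e then
    if sa then (if t && p then "部分编辑" else "完全编辑") else "只读"
  else if v then
    if p && si then (if t then "只读" else "隐藏内容访问") else "只读"
  else "只读"

-- the role/status/flag dispatch of port B, abstracted over the same eight booleans
def pvDispB (a e v ss sa si p t : Bool) : String :=
  if a then
    if ss && p && !t then "只读" else "完全访问"
  else if e then
    if !sa then "只读" else if p && t then "部分编辑" else "完全编辑"
  else if v && p && si && !t then "隐藏内容访问"
  else "只读"

theorem pv_dispAB : ∀ a e v ss sa si p t : Bool,
    pvDispA a e v ss sa si p t = pvDispB a e v ss sa si p t := by decide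

theorem pv_A_noban (user_id : Int) (role : String) (status : String) (flags : List String)
    (hb : flags.contains "Banned" = false) :
    calculate_access user_id role status flags =
      pvDispA (role == "Admin") (role == "Editor") (role == "Viewer")
        (status == "Suspended") (status == "Active") (status == "Inactive")
        (flags.contains "Premium") (flags.contains "Trial") := by
  rw [calculate_access, dif_neg (by rw [hb]; exact Bool.false_ne_true)]
  rfl

theorem pv_B_disp (user_id : Int) (role : String) (status : String) (flags : List String)
    (hbo : (flags.contains "Banned" && !(flags.contains "Override")) = false) :
    calculate_access_alt user_id role status flags =
      pvDispB (role == "Admin") (role == "Editor") (role == "Viewer")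
        (status == "Suspended") (status == "Active") (status == "Inactive")
        (flags.contains "Premium") (flags.contains "Trial") := by
  unfold calculate_access_alt
  rw [if_neg (by rw [hbo]; exact Bool.false_ne_true)]
  rfl

theorem pv_contains_filter (flags : List String) (a : String) (ha : a ≠ "Banned") :
    (flags.filter (fun f => f != "Banned")).contains a = flags.contains a := by
  induction flags with
  | nil => rfl
  | cons x xs ih =>
    by_cases hx : x = "Banned"
    · subst hx
      simp [ha]
    · simp [hx, ha]

-- A on Banned-free flags agrees with B
theorem pv_noban (user_id : Int) (role : String) (status : String) (flags : List String)
    (hb : flags.contains "Banned" = false) :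
    calculate_access user_id role status flags = calculate_access_alt user_id role status flags := by
  rw [pv_A_noban _ _ _ _ hb, pv_B_disp _ _ _ _ (by rw [hb, Bool.false_and]), pv_dispAB]

theorem calculate_access_spec' (user_id : Int) (role : String) (status : String) (flags : List String) :
    calculate_access user_id role status flags = calculate_access_alt user_id role status flags := by
  by_cases hb : flags.contains "Banned" = true
  · by_cases ho : flags.contains "Override" = true
    · have hfb : (flags.filter (fun f => f != "Banned")).contains "Banned" = false := by simp
      rw [calculate_access, dif_pos hb, if_pos ho,
        pv_noban _ _ _ _ hfb,
        pv_B_disp _ _ _ _ (by rw [hfb, Bool.false_and]),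
        pv_B_disp _ _ _ _ (by rw [hb, ho]; rfl),
        pv_contains_filter flags "Premium" (by decide),
        pv_contains_filter flags "Trial" (by decide)]
    · rw [calculate_access, dif_pos hb, if_neg ho]
      unfold calculate_access_alt
      rw [if_pos (by rw [hb, Bool.eq_false_iff.mpr ho]; rfl)]
  · exact pv_noban _ _ _ _ (by simpa using hb)

-- ===== VERDICT (by name: the statement is the Claim_ definition above) =====
theorem calculate_access_spec : Claim_equal_calculate_access := by
  intro u r s f _
  unfold Spec_calculate_access
  exact calculate_access_spec' u r s f
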